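-- pv_equiv track=rewrite | github.com/luv1327/Scaler_Dsa | IntermediateDsa1/carryForward.py | countAGOptimised
-- ===== SOURCE A (Python) =====
-- def countAGOptimised(A):
--     n = len(A)
--     count_g = 0
--     pairs = 0
--     for i in range(n-1,-1,-1):
--         if A[i] == 'g':
--             count_g +=1
--         if A[i] == 'a':
--             pairs += count_g
--     return pairs
-- ===== SOURCE B (Python) =====
-- def countAGOptimised(A):
--     a_pos = [i for i, ch in enumerate(A) if ch == 'a']
--     g_pos = [i for i, ch in enumerate(A) if ch == 'g']
--     pairs = 0
--     seen = 0
--     for g in g_pos: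
--         while a_pos and a_pos[0] < g:
--             a_pos.pop(0)
--             seen += 1
--         pairs += seen
--     return pairs
-- ===== Notes on version B (the rewrite author's own statement) =====
-- stated objective: alternative
-- what changed: Instead of A's single reverse scan with a running count of following 'g's, B first extracts the sorted index lists of 'a's and of 'g's and then counts the pairs by a two-pointer merge of the two index lists (for each 'g', the number of 'a'-indices already passed).
import Mathlib
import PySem

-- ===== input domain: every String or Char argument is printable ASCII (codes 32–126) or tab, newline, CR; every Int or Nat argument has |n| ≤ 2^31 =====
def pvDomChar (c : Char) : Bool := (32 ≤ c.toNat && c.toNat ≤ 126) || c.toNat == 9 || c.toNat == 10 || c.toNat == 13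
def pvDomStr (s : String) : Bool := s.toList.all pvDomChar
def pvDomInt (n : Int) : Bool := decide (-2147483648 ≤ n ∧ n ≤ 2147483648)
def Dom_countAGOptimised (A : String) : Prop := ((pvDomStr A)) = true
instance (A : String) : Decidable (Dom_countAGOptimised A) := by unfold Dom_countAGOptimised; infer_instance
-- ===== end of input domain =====

-- B extracts the sorted index lists of 'a's and 'g's and counts pairs by a two-pointer
-- merge of the two lists, instead of A's single reverse scan with a running 'g' count.
-- ===== PORT A =====
-- loop body of A: updates (count_g, pairs) for one character (A iterates i = n-1 .. 0,
-- i.e. the characters in reverse)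
def aStep (st : Int × Int) (c : Char) : Int × Int :=
  let cg := if c = 'g' then st.1 + 1 else st.1
  let pairs := if c = 'a' then st.2 + cg else st.2
  (cg, pairs)

def countAGOptimised (A : String) : Int :=
  (A.toList.reverse.foldl aStep (0, 0)).2

-- ===== PORT B =====
-- [i for i, ch in enumerate(A) if ch == c]
def bPos (c : Char) (l : List Char) : List Int :=
  ((PySem.List.enumerate l).filter (fun p => p.2 = c)).map (·.1)

-- while a_pos and a_pos[0] < g: a_pos.pop(0); seen += 1
def bWhile : List Int → Int → Int → List Int × Int
  | [], seen, _ => ([], seen)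
  | a :: t, seen, g => if a < g then bWhile t (seen + 1) g else (a :: t, seen)

-- body of 'for g in g_pos', state = (a_pos, seen, pairs)
def bFor (st : List Int × Int × Int) (g : Int) : List Int × Int × Int :=
  let r := bWhile st.1 st.2.1 g
  (r.1, r.2, st.2.2 + r.2)

def countAGOptimised_alt (A : String) : Int :=
  let aPos := bPos 'a' A.toList
  let gPos := bPos 'g' A.toList
  (gPos.foldl bFor (aPos, 0, 0)).2.2

-- ===== PRECONDITION & SPEC =====
def Spec_countAGOptimised (A : String) (out : Int) : Prop := out = countAGOptimised_alt A
instance (A : String) (out : Int) : Decidable (Spec_countAGOptimised A out) := by unfold Spec_countAGOptimised; infer_instance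

-- ===== CLAIM (what is proved, stated in full; the proofs are below) =====
def Claim_equal_countAGOptimised : Prop := ∀ (A : String), Dom_countAGOptimised A → Spec_countAGOptimised A (countAGOptimised A)

-- ===== LEMMAS AND PROOFS =====
-- number of 'g' in a list, as Int
def cntG (l : List Char) : Int := l.foldr (fun c acc => if c = 'g' then acc + 1 else acc) 0
-- the a-before-g pair count, by recursion on the list
def pairsF : List Char → Int
  | [] => 0
  | c :: t => pairsF t + (if c = 'a' then cntG t else 0)

theorem aFold_eq (l : List Char) :
    l.reverse.foldl aStep (0, 0) = (cntG l, pairsF l) := by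
  rw [List.foldl_reverse]
  induction l with
  | nil => simp [cntG, pairsF]
  | cons c t ih =>
    rw [List.foldr_cons, ih]
    simp only [aStep, pairsF, cntG, List.foldr_cons]
    by_cases hg : c = 'g' <;> by_cases ha : c = 'a' <;> simp [hg, ha]

-- positions (starting at i) of character c in a list
def posF (i : Int) (c : Char) : List Char → List Int
  | [] => []
  | x :: t => if x = c then i :: posF (i + 1) c t else posF (i + 1) c t

theorem bPos_eq_posF (c : Char) (l : List Char) : bPos c l = posF 0 c l := by
  suffices h : ∀ (l : List Char) (i : Int),
      ((PySem.List.enumerate l i).filter (fun p => p.2 = c)).map (·.1) = posF i c l by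
    exact h l 0
  intro l
  induction l with
  | nil => intro i; simp [PySem.List.enumerate_nil, posF]
  | cons x t ih =>
    intro i
    rw [PySem.List.enumerate_cons]
    by_cases hx : x = c <;> simp [posF, hx, ih]

theorem posF_mem_le (i : Int) (c : Char) (l : List Char) :
    ∀ x ∈ posF i c l, i ≤ x := by
  induction l generalizing i with
  | nil => simp [posF]
  | cons y t ih =>
    intro x hx
    by_cases hy : y = c
    · rw [posF, if_pos hy] at hx
      rcases List.mem_cons.mp hx with rfl | hx
      · exact le_refl x
      · have := ih (i + 1) x hx; omega
    · rw [posF, if_neg hy] at hx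
      have := ih (i + 1) x hx; omega

theorem posF_sorted (i : Int) (c : Char) (l : List Char) :
    (posF i c l).Pairwise (· ≤ ·) := by
  induction l generalizing i with
  | nil => simp [posF]
  | cons y t ih =>
    by_cases hy : y = c
    · rw [posF, if_pos hy]
      refine List.pairwise_cons.mpr ⟨?_, ih (i + 1)⟩
      intro x hx
      have := posF_mem_le (i + 1) c t x hx; omega
    · rw [posF, if_neg hy]; exact ih (i + 1)

theorem posF_shift (c : Char) (l : List Char) (i d : Int) :
    (posF i c l).map (· + d) = posF (i + d) c l := by
  induction l generalizing i with
  | nil => simp [posF]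
  | cons y t ih =>
    by_cases hy : y = c
    · rw [posF, if_pos hy, posF, if_pos hy, List.map_cons, ih,
        show i + 1 + d = i + d + 1 by ring]
    · rw [posF, if_neg hy, posF, if_neg hy, ih,
        show i + 1 + d = i + d + 1 by ring]

theorem posF_length_g (i : Int) (l : List Char) :
    ((posF i 'g' l).length : Int) = cntG l := by
  induction l generalizing i with
  | nil => simp [posF, cntG]
  | cons y t ih =>
    by_cases hy : y = 'g'
    · rw [posF, if_pos hy, cntG, List.foldr_cons, if_pos hy, List.length_cons]
      have h := ih (i + 1)
      rw [cntG] at h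
      push_cast
      omega
    · rw [posF, if_neg hy, cntG, List.foldr_cons, if_neg hy]
      exact ih (i + 1)

-- the two-pointer sum: for each g, how many a's are below it
def S (aP gP : List Int) : Int :=
  (gP.map (fun g => (((aP.filter (fun a => decide (a < g))).length : Int)))).sum

theorem bWhile_eq (g : Int) (rest : List Int) (seen : Int) :
    bWhile rest seen g
      = (rest.dropWhile (fun a => decide (a < g)),
         seen + ((rest.takeWhile (fun a => decide (a < g))).length : Int)) := by
  induction rest generalizing seen with
  | nil => simp [bWhile]
  | cons a t ih =>
    by_cases ha : a < g
    · rw [bWhile, if_pos ha, ih]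
      simp only [List.takeWhile, List.dropWhile, ha, decide_true, List.length_cons]
      refine Prod.ext rfl ?_
      push_cast; ring
    · rw [bWhile, if_neg ha]
      simp [List.takeWhile, List.dropWhile, ha]

theorem filter_eq_takeWhile_of_sorted (g : Int) (l : List Int)
    (h : l.Pairwise (· ≤ ·)) :
    l.filter (fun a => decide (a < g)) = l.takeWhile (fun a => decide (a < g)) := by
  induction l with
  | nil => rfl
  | cons a t ih =>
    rcases List.pairwise_cons.mp h with ⟨hall, ht⟩
    by_cases ha : a < g
    · simp [List.filter, List.takeWhile, ha, ih ht]
    · simp only [List.filter, List.takeWhile, ha, decide_false]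
      rw [List.filter_eq_nil_iff.mpr]
      intro x hx
      have := hall x hx
      simp; omega

theorem loopSpec (gP : List Int) : ∀ (done rest : List Int) (p : Int),
    (done ++ rest).Pairwise (· ≤ ·) →
    (∀ g ∈ gP, ∀ x ∈ done, x < g) →
    gP.Pairwise (· ≤ ·) →
    (gP.foldl bFor (rest, (done.length : Int), p)).2.2
      = p + S (done ++ rest) gP := by
  induction gP with
  | nil => intro done rest p _ _ _; simp [S]
  | cons g gt ih =>
    intro done rest p hsorted hdone hgp
    rcases List.pairwise_cons.mp hgp with ⟨hgle, hgt⟩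
    have hrest : rest.Pairwise (· ≤ ·) := (List.pairwise_append.mp hsorted).2.1
    rw [List.foldl_cons]
    have hstep : bFor (rest, (done.length : Int), p) g
        = (rest.dropWhile (fun a => decide (a < g)),
           ((done ++ rest.takeWhile (fun a => decide (a < g))).length : Int),
           p + ((done ++ rest.takeWhile (fun a => decide (a < g))).length : Int)) := by
      simp only [bFor, bWhile_eq]
      refine Prod.ext rfl (Prod.ext ?_ ?_) <;> simp [List.length_append]
    rw [hstep]
    set tk := rest.takeWhile (fun a => decide (a < g)) with htk
    set dr := rest.dropWhile (fun a => decide (a < g)) with hdr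
    have hsplit : done ++ rest = (done ++ tk) ++ dr := by
      rw [List.append_assoc, htk, hdr, List.takeWhile_append_dropWhile]
    have hsorted' : ((done ++ tk) ++ dr).Pairwise (· ≤ ·) := hsplit ▸ hsorted
    have hdone' : ∀ g' ∈ gt, ∀ x ∈ done ++ tk, x < g' := by
      intro g' hg' x hx
      rcases List.mem_append.mp hx with hx | hx
      · exact hdone g' (List.mem_cons_of_mem _ hg') x hx
      · have hxg : x < g := by
          have := List.mem_takeWhile_imp (htk ▸ hx)
          simpa using this
        have := hgle g' hg'; omega
    have := ih (done ++ tk) dr (p + ((done ++ tk).length : Int)) hsorted' hdone' hgt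
    rw [this, ← hsplit]
    have hfilter : (done ++ rest).filter (fun a => decide (a < g)) = done ++ tk := by
      rw [List.filter_append, htk, ← filter_eq_takeWhile_of_sorted g rest hrest]
      congr 1
      rw [List.filter_eq_self]
      intro x hx
      have := hdone g (List.mem_cons_self) x hx
      simpa using this
    simp only [S, List.map_cons, List.sum_cons, hfilter]
    ring

theorem sumMapAdd {α : Type} (l : List α) (f g : α → Int) :
    (l.map (fun x => f x + g x)).sum = (l.map f).sum + (l.map g).sum := by
  induction l with
  | nil => simp
  | cons a t ih => simp [ih]; ring

theorem S_append (aP g1 g2 : List Int) : S aP (g1 ++ g2) = S aP g1 + S aP g2 := by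
  simp [S]

-- S over the position lists of (c :: t), reduced to S over t's position lists
theorem S_pairsF (l : List Char) : S (posF 0 'a' l) (posF 0 'g' l) = pairsF l := by
  induction l with
  | nil => simp [posF, pairsF, S]
  | cons c t ih =>
    have haNonneg : ∀ x ∈ posF 0 'a' t, 0 ≤ x := posF_mem_le 0 'a' t
    have hgNonneg : ∀ x ∈ posF 0 'g' t, 0 ≤ x := posF_mem_le 0 'g' t
    -- the per-g count over the new a-list, for g coming from t shifted by 1
    have hcount : ∀ g ∈ posF 0 'g' t,
        ((((if c = 'a' then [(0:Int)] else []) ++ (posF 0 'a' t).map (· + 1)).filter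
            (fun a => decide (a < g + 1))).length : Int)
          = (if c = 'a' then 1 else 0)
            + (((posF 0 'a' t).filter (fun a => decide (a < g))).length : Int) := by
      intro g hg
      have hg0 : 0 ≤ g := hgNonneg g hg
      rw [List.filter_append, List.filter_map]
      have h0 : ((if c = 'a' then [(0:Int)] else []).filter
          (fun a => decide (a < g + 1))) = (if c = 'a' then [(0:Int)] else []) := by
        by_cases hc : c = 'a'
        · simp [hc]; omega
        · simp [hc]
      rw [h0]
      have hpred : ((fun a => decide (a < g + 1)) ∘ (· + (1:Int)))
          = fun a => decide (a < g) := by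
        funext a
        have hiff : a + 1 < g + 1 ↔ a < g := by omega
        simp [Function.comp, hiff]
      rw [hpred]
      by_cases hc : c = 'a' <;> simp [hc]
      ring
    -- now reduce S on the cons
    have hgz : ((((if c = 'a' then [(0:Int)] else []) ++ (posF 0 'a' t).map (· + 1)).filter
        (fun a => decide (a < 0))).length : Int) = 0 := by
      rw [List.filter_eq_nil_iff.mpr]
      · simp
      · intro x hx
        rcases List.mem_append.mp hx with hx | hx
        · by_cases hc : c = 'a'
          · simp [hc] at hx; simp [hx]
          · simp [hc] at hx
        · rcases List.mem_map.mp hx with ⟨y, hy, rfl⟩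
          have := haNonneg y hy
          simp; omega
    have hmapsum : ∀ (aP : List Int),
        (∀ g ∈ posF 0 'g' t,
          ((aP.filter (fun a => decide (a < g + 1))).length : Int)
            = (if c = 'a' then 1 else 0)
              + (((posF 0 'a' t).filter (fun a => decide (a < g))).length : Int)) →
        S aP ((posF 0 'g' t).map (· + 1))
          = (if c = 'a' then (cntG t) else 0) + S (posF 0 'a' t) (posF 0 'g' t) := by
      intro aP hap
      simp only [S, List.map_map]
      have : ((posF 0 'g' t).map ((fun g => ((aP.filter (fun a => decide (a < g))).length : Int)) ∘ (· + 1)))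
          = (posF 0 'g' t).map (fun g => (if c = 'a' then (1:Int) else 0)
              + (((posF 0 'a' t).filter (fun a => decide (a < g))).length : Int)) := by
        apply List.map_congr_left
        intro g hg
        simpa using hap g hg
      rw [this, sumMapAdd]
      congr 1
      rw [List.map_const', List.sum_replicate, ← posF_length_g 0 t]
      by_cases hc : c = 'a' <;> simp [hc]
    have hA : posF 0 'a' (c :: t)
        = (if c = 'a' then [(0:Int)] else []) ++ (posF 0 'a' t).map (· + 1) := by
      rw [posF_shift 'a' t 0 1]
      by_cases hc : c = 'a' <;> simp [posF, hc]
    have hG : posF 0 'g' (c :: t)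
        = (if c = 'g' then [(0:Int)] else []) ++ (posF 0 'g' t).map (· + 1) := by
      rw [posF_shift 'g' t 0 1]
      by_cases hc : c = 'g' <;> simp [posF, hc]
    rw [hA, hG, show pairsF (c :: t) = pairsF t + (if c = 'a' then cntG t else 0) from rfl]
    by_cases hcg : c = 'g'
    · have hca : c ≠ 'a' := by rw [hcg]; decide
      rw [if_pos hcg, if_neg hca, if_neg hca, List.nil_append]
      rw [S_append]
      have h0 : S ((posF 0 'a' t).map (· + 1)) [(0:Int)] = 0 := by
        have := hgz
        rw [if_neg hca, List.nil_append] at this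
        simpa [S] using this
      have h1 := hmapsum ((posF 0 'a' t).map (· + 1)) (by
        intro g hg
        have := hcount g hg
        rwa [if_neg hca, List.nil_append] at this)
      rw [if_neg hca] at h1
      rw [h0, h1, ih]
      ring
    · by_cases hca : c = 'a'
      · rw [if_neg hcg, if_pos hca, if_pos hca, List.nil_append]
        have h1 := hmapsum ([(0:Int)] ++ (posF 0 'a' t).map (· + 1)) (by
          intro g hg
          have := hcount g hg
          rwa [if_pos hca] at this)
        rw [if_pos hca] at h1
        rw [h1, ih]
        ring
      · rw [if_neg hcg, if_neg hca, if_neg hca, List.nil_append, List.nil_append]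
        have h1 := hmapsum ((posF 0 'a' t).map (· + 1)) (by
          intro g hg
          have := hcount g hg
          rwa [if_neg hca, List.nil_append] at this)
        rw [if_neg hca] at h1
        rw [h1, ih]
        ring

-- ===== VERDICT (by name: the statement is the Claim_ definition above) =====
theorem countAGOptimised_spec : Claim_equal_countAGOptimised := by
  intro A _
  unfold Spec_countAGOptimised countAGOptimised countAGOptimised_alt
  rw [aFold_eq]
  simp only [bPos_eq_posF]
  have h := loopSpec (posF 0 'g' A.toList) [] (posF 0 'a' A.toList) 0
    (by simpa using posF_sorted 0 'a' A.toList)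
    (by simp)
    (posF_sorted 0 'g' A.toList)
  simp only [List.nil_append, List.length_nil, Nat.cast_zero, zero_add] at h
  rw [h, S_pairsF]
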